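-- pv_equiv track=rewrite | github.com/user39261580/EEP596-CV | homework/hw2/assignment2.py | box_filter
-- ===== SOURCE A (Python) =====
-- def box_filter(num_repetitions):
--   # Define box filter
--   box_filter = [1, 1, 1]
--   out = [1, 1, 1]
--
--   for _ in range(num_repetitions):
--     # Perform 1D convolution manually
--     # Result will have length N + M - 1
--     N = len(out)
--     M = len(box_filter)
--     result_length = N + M - 1
--     result = [0] * result_length
--
--     # Manual convolution: for each position in output
--     for i in range(result_length):
--       # Sum over all valid overlapping positions
--       for j in range(M):
--         # Check if the index is valid in the 'out' array
--         out_index = i - j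
--         if 0 <= out_index < N:
--           result[i] += out[out_index] * box_filter[j]
--
--     out = result
--
--   # plt.figure(figsize=(10, 6))
--   # plt.plot(out, 'bo-', linewidth=2, markersize=8)
--   # plt.title(f'Box Filter after {num_repetitions} Convolutions (Approximates Gaussian)')
--   # plt.xlabel('Index')
--   # plt.ylabel('Value')
--   # plt.grid(True, alpha=0.3)
--   # plt.show()
--   return out
-- ===== SOURCE B (Python) =====
-- def box_filter(num_repetitions):
--   # One-pass sliding-window convolution: carry the previous two elements
--   # instead of a zero-filled result array with a nested index scan.
--   out = [1, 1, 1]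
--   for _ in range(num_repetitions):
--     res = []
--     a = 0  # previous element of out (or 0)
--     b = 0  # element before that (or 0)
--     for x in out:
--       res.append(x + a + b)
--       a, b = x, a
--     res.append(a + b)
--     res.append(a)
--     out = res
--   return out
-- ===== Notes on version B (the rewrite author's own statement) =====
-- stated objective: alternative
-- what changed: Each convolution step's zero-initialized result array with nested index loops and bounds checks is replaced by a single left-to-right pass that carries the previous two elements as running state (sliding-window sum), appending the two tail elements at the end.
import Mathlib
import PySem

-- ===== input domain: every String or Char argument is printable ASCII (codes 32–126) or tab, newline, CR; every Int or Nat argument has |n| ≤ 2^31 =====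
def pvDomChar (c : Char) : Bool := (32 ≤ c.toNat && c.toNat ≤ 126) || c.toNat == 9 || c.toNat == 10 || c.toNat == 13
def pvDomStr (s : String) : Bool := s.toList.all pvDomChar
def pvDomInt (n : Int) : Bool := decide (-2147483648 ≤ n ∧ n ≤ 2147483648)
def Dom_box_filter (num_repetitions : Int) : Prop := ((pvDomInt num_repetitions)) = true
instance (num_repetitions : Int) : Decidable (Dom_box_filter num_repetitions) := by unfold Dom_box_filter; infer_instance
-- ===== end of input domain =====

-- B replaces A's zero-filled result array with nested index loops by a single
-- carried-state pass per convolution step (sliding window of the last two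
-- elements); same return value.

-- ===== PORT A =====
-- one convolution of `out` with [1,1,1], exactly as A's nested loops compute it
def pvConvA (out : List Int) : List Int :=
  let bf : List Int := [1, 1, 1]
  let N : Int := out.length
  let M : Int := bf.length
  let L : Int := N + M - 1
  (PySem.List.pyRange 0 L 1).foldl (fun r i =>
    (PySem.List.pyRange 0 M 1).foldl (fun r j =>
      let oi := i - j
      if 0 ≤ oi ∧ oi < N then
        PySem.List.pySetD r i
          (PySem.List.pyGetD r i 0 + PySem.List.pyGetD out oi 0 * PySem.List.pyGetD bf j 0)
      else r) r)
    (List.replicate L.toNat 0)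

def box_filter (num_repetitions : Int) : List Int :=
  (PySem.List.pyRange 0 num_repetitions 1).foldl (fun out _ => pvConvA out) [1, 1, 1]

-- ===== PORT B =====
-- one convolution step of B: a single pass carrying the previous two elements
def pvConvB (out : List Int) : List Int :=
  let st := out.foldl
    (fun (st : List Int × Int × Int) x => (st.1 ++ [x + st.2.1 + st.2.2], x, st.2.1))
    (([] : List Int), (0 : Int), (0 : Int))
  (st.1 ++ [st.2.1 + st.2.2]) ++ [st.2.1]

def box_filter_alt (num_repetitions : Int) : List Int :=
  (PySem.List.pyRange 0 num_repetitions 1).foldl (fun out _ => pvConvB out) [1, 1, 1]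

-- ===== PRECONDITION & SPEC =====
def Spec_box_filter (num_repetitions : Int) (out : List Int) : Prop := out = box_filter_alt num_repetitions
instance (num_repetitions : Int) (out : List Int) : Decidable (Spec_box_filter num_repetitions out) := by unfold Spec_box_filter; infer_instance

-- ===== CLAIM (what is proved, stated in full; the proofs are below) =====
def Claim_equal_box_filter : Prop := ∀ (num_repetitions : Int), Dom_box_filter num_repetitions → Spec_box_filter num_repetitions (box_filter num_repetitions)

-- ===== LEMMAS AND PROOFS =====

-- safe indexing: out[i] if 0 ≤ i < len out, else 0
def pvD (out : List Int) (i : Int) : Int :=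
  if 0 ≤ i ∧ i < (out.length : Int) then out.getD i.toNat 0 else 0

-- the value one convolution step deposits at position i
def pvG (out : List Int) (i : Int) : Int := pvD out i + pvD out (i - 1) + pvD out (i - 2)

-- common reference form of one convolution step
def pvSpecList (out : List Int) : List Int :=
  (List.range (out.length + 2)).map (fun k : ℕ => pvG out (k : Int))

-- structural form of B's inner pass
def pvAux : List Int → Int → Int → List Int
  | [], a, b => [a + b, a]
  | x :: xs, a, b => (x + a + b) :: pvAux xs x a

lemma pvConvB_foldl (l : List Int) : ∀ (res : List Int) (a b : Int),
    ((l.foldl (fun (st : List Int × Int × Int) x => (st.1 ++ [x + st.2.1 + st.2.2], x, st.2.1))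
        (res, a, b)).1 ++
      [(l.foldl (fun (st : List Int × Int × Int) x => (st.1 ++ [x + st.2.1 + st.2.2], x, st.2.1))
        (res, a, b)).2.1 +
       (l.foldl (fun (st : List Int × Int × Int) x => (st.1 ++ [x + st.2.1 + st.2.2], x, st.2.1))
        (res, a, b)).2.2]) ++
      [(l.foldl (fun (st : List Int × Int × Int) x => (st.1 ++ [x + st.2.1 + st.2.2], x, st.2.1))
        (res, a, b)).2.1] = res ++ pvAux l a b := by
  induction l with
  | nil => intro res a b; simp [pvAux]
  | cons x xs ih =>
      intro res a b
      simpa [pvAux, List.append_assoc] using ih (res ++ [x + a + b]) x a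

lemma pvConvB_eq_aux (out : List Int) : pvConvB out = pvAux out 0 0 := by
  simpa [pvConvB] using pvConvB_foldl out [] 0 0

lemma pvAux_spec_gen (out : List Int) : ∀ (n m : ℕ), m + n = out.length →
    pvAux (out.drop m) (pvD out ((m : Int) - 1)) (pvD out ((m : Int) - 2)) =
      (List.range (out.length + 2 - m)).map (fun k => pvG out ((m + k : ℕ) : Int)) := by
  intro n
  induction n with
  | zero =>
      intro m hm
      have hdrop : out.drop m = [] := by
        apply List.drop_eq_nil_of_le; omega
      have h2 : out.length + 2 - m = 2 := by omega
      rw [hdrop, h2]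
      have hr : List.range 2 = [0, 1] := by decide
      rw [hr]
      simp only [pvAux, List.map]
      have hz : pvD out ((m : Int)) = 0 := by
        unfold pvD; rw [if_neg]; omega
      have hz1 : pvD out ((m : Int) + 1) = 0 := by
        unfold pvD; rw [if_neg]; omega
      have e0 : pvG out ((m + 0 : ℕ) : Int) = pvD out ((m : Int) - 1) + pvD out ((m : Int) - 2) := by
        unfold pvG
        push_cast
        simp only [add_zero]
        rw [hz]; ring
      have e1 : pvG out ((m + 1 : ℕ) : Int) = pvD out ((m : Int) - 1) := by
        unfold pvG
        push_cast
        have r1 : ((m : Int) + 1 - 1) = (m : Int) := by ring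
        have r2 : ((m : Int) + 1 - 2) = (m : Int) - 1 := by ring
        rw [r1, r2, hz, hz1]; ring
      rw [e0, e1]
  | succ n ih =>
      intro m hm
      have hmlt : m < out.length := by omega
      have hdrop : out.drop m = out[m] :: out.drop (m + 1) :=
        List.drop_eq_getElem_cons hmlt
      rw [hdrop]
      have hx : out[m] = pvD out (m : Int) := by
        unfold pvD
        rw [if_pos (by omega)]
        simp only [Int.toNat_natCast]
        exact (List.getD_eq_getElem _ _ hmlt).symm
      have hb : pvD out ((m : Int) - 1) = pvD out (((m + 1 : ℕ) : Int) - 2) := by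
        congr 1; push_cast; ring
      have hhead : out[m] + pvD out ((m : Int) - 1) + pvD out ((m : Int) - 2) = pvG out (m : Int) := by
        rw [hx]; rfl
      have ihm := ih (m + 1) (by omega)
      have ha : pvD out (((m + 1 : ℕ) : Int) - 1) = pvD out (m : Int) := by
        congr 1; push_cast; ring
      rw [ha, ← hb] at ihm
      rw [← hx] at ihm
      simp only [pvAux]
      rw [ihm, hhead]
      have hlen : out.length + 2 - m = (out.length + 2 - (m + 1)) + 1 := by omega
      rw [hlen, List.range_succ_eq_map, List.map_cons, List.map_map]
      refine congrArg₂ List.cons (by norm_num) ?_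
      apply List.map_congr_left
      intro k _
      simp only [Function.comp_apply]
      congr 1
      omega

lemma pvConvB_spec (out : List Int) : pvConvB out = pvSpecList out := by
  rw [pvConvB_eq_aux, pvSpecList]
  have h := pvAux_spec_gen out out.length 0 (by omega)
  have z1 : pvD out (((0 : ℕ) : Int) - 1) = 0 := by
    unfold pvD; rw [if_neg]; omega
  have z2 : pvD out (((0 : ℕ) : Int) - 2) = 0 := by
    unfold pvD; rw [if_neg]; omega
  rw [z1, z2] at h
  simp only [List.drop_zero, Nat.zero_add, Nat.sub_zero] at h
  simpa using h

-- A side -------------------------------------------------------------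

lemma set_map_range (L n : ℕ) (f : ℕ → Int) (v : Int) :
    ((List.range L).map f).set n v =
      (List.range L).map (fun k => if k = n then v else f k) := by
  apply List.ext_getElem
  · simp
  · intro k h1 h2
    simp only [List.getElem_set, List.getElem_map, List.getElem_range]
    by_cases h : k = n
    · subst h; simp
    · simp [h, Ne.symm h]

lemma getD_map_range' (L n : ℕ) (f : ℕ → Int) (hn : n < L) :
    ((List.range L).map f).getD n 0 = f n := by
  rw [List.getD_eq_getElem _ _ (by simpa using hn)]
  simp

-- one conditional update of A's inner loop, on the canonical state shape
lemma pv_step (out : List Int) (n : ℕ) (hn : n < out.length + 2) (j t : Int) :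
    (if 0 ≤ (n : Int) - j ∧ (n : Int) - j < (out.length : Int) then
        PySem.List.pySetD
          ((List.range (out.length + 2)).map
            (fun k => if k = n then t else if k < n then pvG out (k : Int) else 0))
          (n : Int)
          (PySem.List.pyGetD
            ((List.range (out.length + 2)).map
              (fun k => if k = n then t else if k < n then pvG out (k : Int) else 0))
            (n : Int) 0 +
           PySem.List.pyGetD out ((n : Int) - j) 0 * 1)
      else
        (List.range (out.length + 2)).map
          (fun k => if k = n then t else if k < n then pvG out (k : Int) else 0)) =
    (List.range (out.length + 2)).map
      (fun k => if k = n then t + pvD out ((n : Int) - j) else if k < n then pvG out (k : Int) else 0) := by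
  by_cases c : 0 ≤ (n : Int) - j ∧ (n : Int) - j < (out.length : Int)
  · rw [if_pos c]
    have hget : PySem.List.pyGetD
        ((List.range (out.length + 2)).map
          (fun k => if k = n then t else if k < n then pvG out (k : Int) else 0))
        (n : Int) 0 = t := by
      rw [PySem.List.pyGetD_natCast, getD_map_range' _ _ _ hn]
      simp
    have hout : PySem.List.pyGetD out ((n : Int) - j) 0 = pvD out ((n : Int) - j) := by
      unfold pvD
      rw [if_pos c, PySem.List.pyGetD_eq_getElem out 0 c.1 c.2]
      exact (List.getD_eq_getElem _ _ (by omega)).symm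
    rw [hget, hout, mul_one, PySem.List.pySetD_natCast, set_map_range]
    apply List.map_congr_left
    intro k _
    by_cases hk : k = n <;> simp [hk]
  · rw [if_neg c]
    have hz : pvD out ((n : Int) - j) = 0 := by unfold pvD; rw [if_neg c]
    rw [hz]
    apply List.map_congr_left
    intro k _
    by_cases hk : k = n <;> simp [hk]

-- one outer iteration of A's loop, acting on the partially-filled state
lemma pvConvA_step (out : List Int) (n : ℕ) (hn : n < out.length + 2) :
    (PySem.List.pyRange 0 3 1).foldl (fun r j =>
        if 0 ≤ (n : Int) - j ∧ (n : Int) - j < (out.length : Int) then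
          PySem.List.pySetD r (n : Int)
            (PySem.List.pyGetD r (n : Int) 0 +
              PySem.List.pyGetD out ((n : Int) - j) 0 * PySem.List.pyGetD [(1 : Int), 1, 1] j 0)
        else r)
      ((List.range (out.length + 2)).map (fun k => if k < n then pvG out (k : Int) else 0)) =
    (List.range (out.length + 2)).map (fun k => if k < n + 1 then pvG out (k : Int) else 0) := by
  have hr3 : PySem.List.pyRange 0 3 1 = [0, 1, 2] := by decide
  have hb0 : PySem.List.pyGetD [(1 : Int), 1, 1] 0 0 = 1 := by decide
  have hb1 : PySem.List.pyGetD [(1 : Int), 1, 1] 1 0 = 1 := by decide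
  have hb2 : PySem.List.pyGetD [(1 : Int), 1, 1] 2 0 = 1 := by decide
  rw [hr3]
  simp only [List.foldl_cons, List.foldl_nil, hb0, hb1, hb2]
  have hinit : (List.range (out.length + 2)).map (fun k => if k < n then pvG out (k : Int) else 0) =
      (List.range (out.length + 2)).map
        (fun k => if k = n then 0 else if k < n then pvG out (k : Int) else 0) := by
    apply List.map_congr_left
    intro k _
    by_cases hk : k = n
    · subst hk; simp
    · simp [hk]
  rw [hinit, pv_step out n hn 0 0, pv_step out n hn 1 (0 + pvD out ((n : Int) - 0)),
    pv_step out n hn 2 (0 + pvD out ((n : Int) - 0) + pvD out ((n : Int) - 1))]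
  apply List.map_congr_left
  intro k hk
  by_cases h1 : k = n
  · subst h1
    simp only [if_pos (Nat.lt_succ_self k)]
    unfold pvG
    push_cast
    ring_nf
  · have : (k < n + 1) ↔ (k < n) := by omega
    simp [h1, this]

lemma pvConvA_inv (out : List Int) : ∀ nn : ℕ, nn ≤ out.length + 2 →
    (List.range nn).foldl
      (fun r (k : ℕ) =>
        (PySem.List.pyRange 0 3 1).foldl (fun r j =>
          if 0 ≤ (k : Int) - j ∧ (k : Int) - j < (out.length : Int) then
            PySem.List.pySetD r (k : Int)
              (PySem.List.pyGetD r (k : Int) 0 +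
                PySem.List.pyGetD out ((k : Int) - j) 0 * PySem.List.pyGetD [(1 : Int), 1, 1] j 0)
          else r) r)
      (List.replicate (out.length + 2) 0) =
    (List.range (out.length + 2)).map (fun k : ℕ => if k < nn then pvG out (k : Int) else 0) := by
  intro nn
  induction nn with
  | zero =>
      intro _
      have : (List.range (out.length + 2)).map (fun _ : ℕ => (0 : Int)) =
          List.replicate (out.length + 2) 0 := by
        simp [List.map_const']
      simp only [List.range_zero, List.foldl_nil, Nat.not_lt_zero, if_false]
      exact this.symm
  | succ nn ih =>
      intro h
      rw [List.range_succ, List.foldl_append, ih (by omega), List.foldl_cons, List.foldl_nil]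
      exact pvConvA_step out nn (by omega)

lemma pvConvA_spec (out : List Int) : pvConvA out = pvSpecList out := by
  have hfin := pvConvA_inv out (out.length + 2) le_rfl
  show (PySem.List.pyRange 0 ((out.length : Int) + 3 - 1) 1).foldl
      (fun r i =>
        (PySem.List.pyRange 0 3 1).foldl (fun r j =>
          if 0 ≤ i - j ∧ i - j < (out.length : Int) then
            PySem.List.pySetD r i
              (PySem.List.pyGetD r i 0 +
                PySem.List.pyGetD out (i - j) 0 * PySem.List.pyGetD [(1 : Int), 1, 1] j 0)
          else r) r)
      (List.replicate ((out.length : Int) + 3 - 1).toNat 0) =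
    (List.range (out.length + 2)).map (fun k : ℕ => pvG out (k : Int))
  have hL : ((out.length : Int) + 3 - 1) = (((out.length + 2 : ℕ)) : Int) := by push_cast; ring
  rw [hL, Int.toNat_natCast, PySem.List.pyRange_one 0 (((out.length + 2 : ℕ)) : Int)]
  simp only [Int.sub_zero, Int.toNat_natCast, zero_add]
  rw [List.foldl_map]
  refine Eq.trans hfin ?_
  apply List.map_congr_left
  intro k hk
  rw [if_pos (List.mem_range.mp hk)]

lemma conv_eq (out : List Int) : pvConvA out = pvConvB out := by
  rw [pvConvA_spec, pvConvB_spec]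

lemma foldl_ignore_eq (l : List Int) : ∀ (init : List Int),
    l.foldl (fun out _ => pvConvA out) init = l.foldl (fun out _ => pvConvB out) init := by
  induction l with
  | nil => intro init; rfl
  | cons x xs ih => intro init; simp only [List.foldl]; rw [conv_eq]; exact ih _

-- ===== VERDICT (by name: the statement is the Claim_ definition above) =====
theorem box_filter_spec : Claim_equal_box_filter := by
  intro n _
  unfold Spec_box_filter box_filter box_filter_alt
  exact foldl_ignore_eq _ _
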